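-- pv_equiv track=rewrite | github.com/chyahia/exam-proctoring-scheduler | app.py | get_state_from_failures_dominant
-- ===== SOURCE A (Python) =====
-- def get_state_from_failures_dominant(failures, unplaced_count):
--     """
--     تحول قائمة الأخطاء إلى تمثيل "حالة" مبسط.
--     تركز الحالة على المشكلة الأكثر إلحاحًا: النقص أولاً، ثم الأخطاء الصارمة.
--     """
--     if unplaced_count > 0:
--         return "UNPLACED_ITEMS"
--
--     hard_failures = [f for f in failures if f.get('penalty', 0) >= 100]
--     if hard_failures:
--         # يمكنك جعلها أكثر تفصيلاً بالبحث عن نوع الخطأ الصارم الأكثر تكراراً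
--         return "HARD_CONSTRAINT_VIOLATION"
--
--     soft_failures = [f for f in failures if 0 < f.get('penalty', 0) < 100]
--     if soft_failures:
--         return "SOFT_CONSTRAINT_VIOLATION"
--
--     return "OPTIMAL_OR_NEAR_OPTIMAL"
-- ===== SOURCE B (Python) =====
-- def get_state_from_failures_dominant(failures, unplaced_count):
--     if unplaced_count > 0:
--         return "UNPLACED_ITEMS"
--     seen_soft = False
--     for f in failures:
--         p = f.get('penalty', 0)
--         if p >= 100:
--             return "HARD_CONSTRAINT_VIOLATION"
--         if p > 0:
--             seen_soft = True
--     return "SOFT_CONSTRAINT_VIOLATION" if seen_soft else "OPTIMAL_OR_NEAR_OPTIMAL"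
-- ===== Notes on version B (the rewrite author's own statement) =====
-- stated objective: simpler
-- what changed: Replaces A's two staged filtered-list comprehensions with a single early-exit scan that returns HARD as soon as a penalty >= 100 is seen and otherwise tracks a seen-soft flag.
import Mathlib
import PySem

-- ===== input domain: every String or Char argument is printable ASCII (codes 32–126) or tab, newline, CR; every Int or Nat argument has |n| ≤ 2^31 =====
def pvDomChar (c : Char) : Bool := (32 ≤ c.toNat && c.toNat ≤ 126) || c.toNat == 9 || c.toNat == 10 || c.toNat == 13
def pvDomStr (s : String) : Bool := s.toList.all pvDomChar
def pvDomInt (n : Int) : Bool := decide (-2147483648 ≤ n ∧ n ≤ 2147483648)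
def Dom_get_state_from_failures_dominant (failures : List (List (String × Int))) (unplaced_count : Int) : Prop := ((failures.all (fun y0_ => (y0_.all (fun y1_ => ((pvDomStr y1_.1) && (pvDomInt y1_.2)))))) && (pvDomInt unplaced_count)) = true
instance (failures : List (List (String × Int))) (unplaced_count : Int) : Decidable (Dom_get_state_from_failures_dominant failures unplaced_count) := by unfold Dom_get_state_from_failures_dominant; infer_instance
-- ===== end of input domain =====

-- B replaces A's two staged filtered-list builds with one early-exit scan carrying a seen-soft flag (simpler, O(1) extra space).
-- ===== PORT A =====
-- f.get('penalty', 0): first-match association-list lookup with default 0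
def pvPenalty (f : List (String × Int)) : Int := (PySem.Dict.mk f).getD "penalty" 0

def get_state_from_failures_dominant (failures : List (List (String × Int))) (unplaced_count : Int) : String :=
  if unplaced_count > 0 then "UNPLACED_ITEMS"
  else
    let hard_failures := failures.filter (fun f => decide (100 ≤ pvPenalty f))
    if hard_failures ≠ [] then "HARD_CONSTRAINT_VIOLATION"
    else
      let soft_failures := failures.filter (fun f => decide (0 < pvPenalty f ∧ pvPenalty f < 100))
      if soft_failures ≠ [] then "SOFT_CONSTRAINT_VIOLATION"
      else "OPTIMAL_OR_NEAR_OPTIMAL"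

-- ===== PORT B =====
-- B's for-loop with early return, as structural recursion over the list carrying the seen_soft flag
def pvClassify : List (List (String × Int)) → Bool → String
  | [], seen_soft =>
      if seen_soft then "SOFT_CONSTRAINT_VIOLATION" else "OPTIMAL_OR_NEAR_OPTIMAL"
  | f :: rest, seen_soft =>
      let p := pvPenalty f
      if p ≥ 100 then "HARD_CONSTRAINT_VIOLATION"
      else pvClassify rest (seen_soft || decide (p > 0))

def get_state_from_failures_dominant_alt (failures : List (List (String × Int))) (unplaced_count : Int) : String :=
  if unplaced_count > 0 then "UNPLACED_ITEMS"
  else pvClassify failures false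

-- ===== PRECONDITION & SPEC =====
def Spec_get_state_from_failures_dominant (failures : List (List (String × Int))) (unplaced_count : Int) (out : String) : Prop := out = get_state_from_failures_dominant_alt failures unplaced_count
instance (failures : List (List (String × Int))) (unplaced_count : Int) (out : String) : Decidable (Spec_get_state_from_failures_dominant failures unplaced_count out) := by unfold Spec_get_state_from_failures_dominant; infer_instance

-- ===== CLAIM (what is proved, stated in full; the proofs are below) =====
def Claim_equal_get_state_from_failures_dominant : Prop := ∀ (failures : List (List (String × Int))) (unplaced_count : Int), Dom_get_state_from_failures_dominant failures unplaced_count → Spec_get_state_from_failures_dominant failures unplaced_count (get_state_from_failures_dominant failures unplaced_count)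

-- ===== LEMMAS AND PROOFS =====
-- characterisation of B's scan: HARD if any penalty ≥ 100, else SOFT if the flag or any positive penalty, else OPTIMAL
theorem pvClassify_eq (l : List (List (String × Int))) (seen : Bool) :
    pvClassify l seen =
      if ∃ f ∈ l, 100 ≤ pvPenalty f then "HARD_CONSTRAINT_VIOLATION"
      else if seen = true ∨ ∃ f ∈ l, 0 < pvPenalty f then "SOFT_CONSTRAINT_VIOLATION"
      else "OPTIMAL_OR_NEAR_OPTIMAL" := by
  induction l generalizing seen with
  | nil => cases seen <;> simp [pvClassify]
  | cons x xs ih =>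
    by_cases hx : pvPenalty x ≥ 100
    · have h1 : ∃ f ∈ x :: xs, 100 ≤ pvPenalty f := ⟨x, List.mem_cons_self, hx⟩
      simp [pvClassify, hx]
    · simp only [pvClassify, hx, if_false, ih]
      by_cases hh : ∃ f ∈ xs, 100 ≤ pvPenalty f
      · have h2 : ∃ f ∈ x :: xs, 100 ≤ pvPenalty f :=
          let ⟨f, hf, hp⟩ := hh; ⟨f, List.mem_cons_of_mem _ hf, hp⟩
        rw [if_pos hh, if_pos h2]
      · have h2 : ¬ ∃ f ∈ x :: xs, 100 ≤ pvPenalty f := by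
          rintro ⟨f, hf, hp⟩
          rcases List.mem_cons.mp hf with rfl | hf
          · exact hx hp
          · exact hh ⟨f, hf, hp⟩
        have hiff : ((seen || decide (pvPenalty x > 0)) = true ∨ ∃ f ∈ xs, 0 < pvPenalty f) ↔
            (seen = true ∨ ∃ f ∈ x :: xs, 0 < pvPenalty f) := by
          simp only [Bool.or_eq_true, decide_eq_true_eq, List.mem_cons, exists_eq_or_imp, gt_iff_lt]
          tauto
        rw [if_neg hh, if_neg h2]
        by_cases hc : seen = true ∨ ∃ f ∈ x :: xs, 0 < pvPenalty f
        · rw [if_pos (hiff.mpr hc), if_pos hc]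
        · rw [if_neg (fun h => hc (hiff.mp h)), if_neg hc]

-- ===== VERDICT (by name: the statement is the Claim_ definition above) =====
theorem get_state_from_failures_dominant_spec : Claim_equal_get_state_from_failures_dominant := by
  intro failures unplaced_count _
  unfold Spec_get_state_from_failures_dominant
  unfold get_state_from_failures_dominant get_state_from_failures_dominant_alt
  by_cases hu : unplaced_count > 0
  · simp [hu]
  · simp only [hu, if_false, pvClassify_eq]
    by_cases hhard : ∃ f ∈ failures, 100 ≤ pvPenalty f
    · have : failures.filter (fun f => decide (100 ≤ pvPenalty f)) ≠ [] := by
        obtain ⟨f, hf, hp⟩ := hhard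
        simp only [ne_eq, List.filter_eq_nil_iff, not_forall]
        exact ⟨f, hf, by simpa using hp⟩
      simp [this, hhard]
    · have hfil : failures.filter (fun f => decide (100 ≤ pvPenalty f)) = [] := by
        simp only [List.filter_eq_nil_iff]
        intro f hf
        simpa using fun h => hhard ⟨f, hf, h⟩
      simp only [hfil, ne_eq, not_true_eq_false, if_false, hhard, Bool.false_eq_true,
        false_or, reduceIte]
      by_cases hsoft : ∃ f ∈ failures, 0 < pvPenalty f
      · have : failures.filter (fun f => decide (0 < pvPenalty f ∧ pvPenalty f < 100)) ≠ [] := by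
          obtain ⟨f, hf, hp⟩ := hsoft
          have hlt : pvPenalty f < 100 := lt_of_not_ge (fun h => hhard ⟨f, hf, h⟩)
          simp only [ne_eq, List.filter_eq_nil_iff, not_forall]
          exact ⟨f, hf, by simp [hp, hlt]⟩
        have hsoft2 : ∃ f ∈ failures, 0 < pvPenalty f ∧ pvPenalty f < 100 := by
          obtain ⟨f, hf, hp⟩ := hsoft
          exact ⟨f, hf, hp, lt_of_not_ge (fun h => hhard ⟨f, hf, h⟩)⟩
        simp [hsoft2]
        exact hsoft
      · have hfil2 : failures.filter (fun f => decide (0 < pvPenalty f ∧ pvPenalty f < 100)) = [] := by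
          simp only [List.filter_eq_nil_iff]
          intro f hf
          simp only [decide_eq_true_eq, not_and]
          exact fun h => absurd ⟨f, hf, h⟩ hsoft
        simp [hsoft]
        exact fun a ha h0 => absurd ⟨a, ha, h0⟩ hsoft
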